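-- pv_equiv track=rewrite | github.com/ahal/coco-tools | pertestcoverage/utils/cocoanalyze/categorize.py | categorize_js_changes
-- ===== SOURCE A (Python) =====
-- def find_failed_changesets(data):
-- 	new_data_list = {}
-- 	for changeset, info in data.items():
-- 		if info['testsnotrun']:
-- 			new_data_list[changeset] = info
-- 	return new_data_list
--
-- def find_failed_changesets_list(datalist):
-- 	failed_ptc_data = []
-- 	for data in datalist:
-- 		failed_ptc_data.append(find_failed_changesets(data))
-- 	return failed_ptc_data
--
-- def is_js_file(file):
-- 	if '.js' in file and not file.endswith('.json'):
-- 		return True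
-- 	return False
--
-- def js_file_exists(ptc_info):
-- 	fmod = ptc_info['files_modified']
-- 	for f in fmod:
-- 		if is_js_file(f):
-- 			return True
-- 	return False
--
-- def categorize_js_changes(ptc_breakdown_datalist, use_failed=True, **kwargs):
-- 	'''Returns changesets which have JS changes.'''
-- 	new_data_list = []
--
-- 	failed_ptc_data = ptc_breakdown_datalist
-- 	if use_failed:
-- 		failed_ptc_data = find_failed_changesets_list(ptc_breakdown_datalist)
--
-- 	for data in failed_ptc_data:
-- 		new_data_list.append(
-- 			{
-- 				cset: info
-- 				for cset, info in data.items()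
-- 				if js_file_exists(info)
-- 			}
-- 		)
--
-- 	return new_data_list
-- ===== SOURCE B (Python) =====
-- def categorize_js_changes(ptc_breakdown_datalist, use_failed=True, **kwargs):
-- 	'''Returns changesets which have JS changes.'''
-- 	return [
-- 		{
-- 			cset: info
-- 			for cset, info in data.items()
-- 			if (not use_failed or info['testsnotrun'])
-- 			and any('.js' in f and not f.endswith('.json') for f in info['files_modified'])
-- 		}
-- 		for data in ptc_breakdown_datalist
-- 	]
-- ===== Notes on version B (the rewrite author's own statement) =====
-- stated objective: simpler
-- what changed: A builds intermediate failed-changeset dicts in a separate prior pass and then filters each for JS files; B is a single list comprehension whose one fused filter keeps a changeset iff (not use_failed or info['testsnotrun']) and a '.js' non-'.json' file is among its files_modified.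
import Mathlib
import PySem

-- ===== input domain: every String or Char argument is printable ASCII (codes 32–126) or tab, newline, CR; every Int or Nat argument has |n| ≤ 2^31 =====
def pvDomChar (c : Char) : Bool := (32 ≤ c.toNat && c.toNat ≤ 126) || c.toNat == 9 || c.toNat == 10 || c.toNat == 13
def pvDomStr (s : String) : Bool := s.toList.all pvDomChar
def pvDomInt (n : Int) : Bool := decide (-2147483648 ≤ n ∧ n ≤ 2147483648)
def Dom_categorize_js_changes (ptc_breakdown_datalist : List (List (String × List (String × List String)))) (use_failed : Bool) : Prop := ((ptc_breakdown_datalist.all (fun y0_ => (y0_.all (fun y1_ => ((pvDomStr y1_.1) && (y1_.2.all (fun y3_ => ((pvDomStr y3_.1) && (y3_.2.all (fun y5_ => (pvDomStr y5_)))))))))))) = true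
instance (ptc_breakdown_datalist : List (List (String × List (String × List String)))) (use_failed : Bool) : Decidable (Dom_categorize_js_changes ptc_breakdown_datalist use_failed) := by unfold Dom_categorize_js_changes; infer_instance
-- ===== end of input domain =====

-- B fuses A's two staged passes (failed-changeset dicts built first, then JS filtering)
-- into one list comprehension with a single fused filter; objective: simpler (no speed claim).

-- Shared primitive: Python dict lookup d[k] with default, on an association list.
-- Exact for dicts (unique keys, as Pre_ requires); the default only arises where Python
-- would raise KeyError, which Pre_ excludes.
def pvLookupD {α : Type} (d : List (String × α)) (k : String) (df : α) : α :=
  match d.find? (fun q => q.1 == k) with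
  | some q => q.2
  | none => df

-- ===== PORT A =====
def is_js_file (file : String) : Bool :=
  if PySem.Str.isIn ".js" file && !(PySem.Str.endswith file ".json") then true else false

def js_file_exists (ptc_info : List (String × List String)) : Bool :=
  let fmod := pvLookupD ptc_info "files_modified" []
  fmod.any (fun f => is_js_file f)

def find_failed_changesets (data : List (String × List (String × List String))) : List (String × List (String × List String)) :=
  data.foldl (fun nd p => if pvLookupD p.2 "testsnotrun" [] ≠ [] then nd ++ [p] else nd) []

def find_failed_changesets_list (datalist : List (List (String × List (String × List String)))) : List (List (String × List (String × List String))) :=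
  datalist.foldl (fun acc data => acc ++ [find_failed_changesets data]) []

def categorize_js_changes (ptc_breakdown_datalist : List (List (String × List (String × List String)))) (use_failed : Bool) : List (List (String × List (String × List String))) :=
  let failed_ptc_data := if use_failed then find_failed_changesets_list ptc_breakdown_datalist else ptc_breakdown_datalist
  failed_ptc_data.foldl (fun acc data =>
    acc ++ [data.foldl (fun d p => if js_file_exists p.2 then d ++ [p] else d) []]) []

-- ===== PORT B =====
def categorize_js_changes_alt (ptc_breakdown_datalist : List (List (String × List (String × List String)))) (use_failed : Bool) : List (List (String × List (String × List String))) :=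
  ptc_breakdown_datalist.map (fun data =>
    data.filter (fun p =>
      (!use_failed || pvLookupD p.2 "testsnotrun" [] ≠ []) &&
      (pvLookupD p.2 "files_modified" []).any
        (fun f => PySem.Str.isIn ".js" f && !(PySem.Str.endswith f ".json"))))

-- ===== PRECONDITION & SPEC =====
-- Pre_ excludes exactly (a) inputs where Python raises KeyError: a missing 'testsnotrun'
-- key when use_failed is set, or a missing 'files_modified' key on an info dict that the JS
-- filter actually inspects; and (b) association lists with duplicate keys, which no Python
-- dict value can represent (a dict collapses them), so they correspond to no Python input.
-- Bool-valued helpers for Pre_ (kept independent of the ports).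
def pvNodupKeys {α : Type} (d : List (String × α)) : Bool :=
  match d with
  | [] => true
  | p :: rest => !(rest.any (fun q => q.1 == p.1)) && pvNodupKeys rest

def pvHasKey {α : Type} (d : List (String × α)) (k : String) : Bool :=
  d.any (fun p => p.1 == k)

def pvKeyTruthy (d : List (String × List String)) (k : String) : Bool :=
  match d.find? (fun p => p.1 == k) with
  | some p => !p.2.isEmpty
  | none => false

def Pre_categorize_js_changes (ptc_breakdown_datalist : List (List (String × List (String × List String)))) (use_failed : Bool) : Prop :=
  (ptc_breakdown_datalist.all (fun data => pvNodupKeys data && data.all (fun p =>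
    pvNodupKeys p.2 &&
      (if use_failed then
        pvHasKey p.2 "testsnotrun" &&
          (!(pvKeyTruthy p.2 "testsnotrun") || pvHasKey p.2 "files_modified")
       else pvHasKey p.2 "files_modified")))) = true
instance (ptc_breakdown_datalist : List (List (String × List (String × List String)))) (use_failed : Bool) : Decidable (Pre_categorize_js_changes ptc_breakdown_datalist use_failed) := by unfold Pre_categorize_js_changes; infer_instance

def pvWitness_categorize_js_changes : (List (List (String × List (String × List String)))) × Bool :=
  ([[("c1", [("testsnotrun", ["t1"]), ("files_modified", ["a.js", "b.json"])]),
     ("c2", [("testsnotrun", []), ("files_modified", ["c.js"])])]], true)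

def Spec_categorize_js_changes (ptc_breakdown_datalist : List (List (String × List (String × List String)))) (use_failed : Bool) (out : List (List (String × List (String × List String)))) : Prop := out = categorize_js_changes_alt ptc_breakdown_datalist use_failed
instance (ptc_breakdown_datalist : List (List (String × List (String × List String)))) (use_failed : Bool) (out : List (List (String × List (String × List String)))) : Decidable (Spec_categorize_js_changes ptc_breakdown_datalist use_failed out) := by unfold Spec_categorize_js_changes; infer_instance

-- ===== CLAIM (what is proved, stated in full; the proofs are below) =====
def Claim_equal_categorize_js_changes : Prop := ∀ (ptc_breakdown_datalist : List (List (String × List (String × List String)))) (use_failed : Bool), Dom_categorize_js_changes ptc_breakdown_datalist use_failed → Pre_categorize_js_changes ptc_breakdown_datalist use_failed → Spec_categorize_js_changes ptc_breakdown_datalist use_failed (categorize_js_changes ptc_breakdown_datalist use_failed)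

-- ===== LEMMAS AND PROOFS =====

-- ===== VERDICT (by name: the statement is the Claim_ definition above) =====
theorem categorize_js_changes_spec : Claim_equal_categorize_js_changes := by
  intro l u _ _
  unfold Spec_categorize_js_changes categorize_js_changes
  cases u
  case false =>
    simp only [Bool.false_eq_true, if_false]
    rw [PySem.List.foldl_append_singleton_eq_map]
    simp only [List.nil_append]
    unfold categorize_js_changes_alt
    apply List.map_congr_left
    intro data _
    rw [PySem.List.foldl_append_if_eq_filter]
    simp only [List.nil_append]
    apply List.filter_congr
    intro p _
    simp [js_file_exists, is_js_file]
  case true =>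
    simp only [if_true]
    unfold find_failed_changesets_list
    rw [PySem.List.foldl_append_singleton_eq_map]
    simp only [List.nil_append]
    rw [PySem.List.foldl_append_singleton_eq_map]
    simp only [List.nil_append, List.map_map]
    unfold categorize_js_changes_alt
    apply List.map_congr_left
    intro data _
    simp only [Function.comp]
    unfold find_failed_changesets
    rw [PySem.List.foldl_append_if_eq_filter, PySem.List.foldl_append_ite_eq_filter]
    simp only [List.nil_append, List.filter_filter]
    apply List.filter_congr
    intro p _
    simp [js_file_exists, is_js_file, Bool.and_comm]
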